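-- pv_equiv track=rewrite | github.com/Algorithm-bbackgongdan/Almut-3rd | code/itsme-shawn/week3/prog_64602.py | solution
-- ===== SOURCE A (Python) =====
-- def solution(stones, k):
--     left, right = 1, max(stones)
--     res = 0
--
--     while left <= right:
--         mid = (left + right) // 2
--
--         consecutive_zeros = 0  # 연속된 0의 개수 초기화
--         flag = True  # 건널 수 있는지 여부 플래그
--
--         for stone in stones:
--             if stone < mid:
--                 consecutive_zeros += 1  # 현재 돌의 값이 mid보다 작으면 연속된 0의 개수를 증가
--                 if consecutive_zeros >= k:
--                     flag = False  # 연속된 0의 개수가 k보다 크거나 같으면 건널 수 없음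
--                     break
--             else:
--                 consecutive_zeros = 0  # 현재 돌의 값이 mid 이상이면 연속된 0의 개수 초기화
--
--         if flag:
--             res = mid  # 답 저장
--             left = mid + 1  # 건널 수 있는 경우, 왼쪽 범위를 mid + 1로 이동
--         else:
--             right = mid - 1  # 건널 수 없는 경우, 오른쪽 범위를 mid - 1로 이동
--
--     return res
-- ===== SOURCE B (Python) =====
-- def solution(stones, k):
--     # crossing capacity = min over all windows of k consecutive stones of the
--     # window's maximum; with fewer than k stones every value crosses.
--     # Clamped below at 0: the answer counts people, never negative.
--     n = len(stones)
--     res = max(stones)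
--     for i in range(n - k + 1):
--         m = max(stones[i:i + k])
--         if m < res:
--             res = m
--     return res if res > 0 else 0
-- ===== Notes on version B (the rewrite author's own statement) =====
-- stated objective: alternative
-- what changed: Replaces the binary search over candidate values with its feasibility scan by a single direct pass computing the minimum over all k-windows of the window maximum (clamped below at 0), with no search and no feasibility predicate.
-- outside the precondition, e.g. on solution([3, 1, 2], 0): A returns 1, B raises ValueError
import Mathlib
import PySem

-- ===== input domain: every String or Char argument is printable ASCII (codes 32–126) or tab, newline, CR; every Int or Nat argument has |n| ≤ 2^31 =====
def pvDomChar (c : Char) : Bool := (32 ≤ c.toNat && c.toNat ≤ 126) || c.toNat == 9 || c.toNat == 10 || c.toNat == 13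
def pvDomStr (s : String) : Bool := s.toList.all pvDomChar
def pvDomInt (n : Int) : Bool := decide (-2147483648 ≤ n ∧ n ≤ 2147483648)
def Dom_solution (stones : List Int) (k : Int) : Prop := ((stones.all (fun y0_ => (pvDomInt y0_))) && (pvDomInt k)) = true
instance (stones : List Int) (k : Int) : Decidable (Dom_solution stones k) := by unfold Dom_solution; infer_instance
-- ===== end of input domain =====

-- B replaces A's binary search + feasibility scan by one direct pass taking the
-- minimum over all k-windows of the window maximum (clamped below at 0).
-- ===== PORT A =====
-- A's inner `for stone in stones` loop with the break: returns the flag.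
def crossLoop (mid k : Int) : List Int → Int → Bool
  | [], _ => true
  | s :: rest, cz =>
    if s < mid then
      if cz + 1 ≥ k then false else crossLoop mid k rest (cz + 1)
    else crossLoop mid k rest 0

-- A's `while left <= right` binary search carrying res.
def bsearch (stones : List Int) (k left right res : Int) : Int :=
  if h : left ≤ right then
    let mid := PySem.Int.floordiv (left + right) 2
    if crossLoop mid k stones 0 then
      bsearch stones k (mid + 1) right mid
    else
      bsearch stones k left (mid - 1) res
  else res
termination_by (right + 1 - left).toNat
decreasing_by
  · have := PySem.Int.floordiv_two_mid_bounds h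
    omega
  · have := PySem.Int.floordiv_two_mid_bounds h
    omega

def solution (stones : List Int) (k : Int) : Int :=
  match PySem.List.max? stones (fun y => y) with
  | none => 0          -- max([]) raises ValueError; excluded by Pre_solution
  | some mx => bsearch stones k 1 mx 0

-- ===== PORT B =====
def solution_alt (stones : List Int) (k : Int) : Int :=
  match PySem.List.max? stones (fun y => y) with
  | none => 0          -- max([]) raises ValueError; excluded by Pre_solution
  | some mx =>
    let n := PySem.List.len stones
    let res := (PySem.List.pyRange 0 (n - k + 1) 1).foldl
      (fun res i =>
        match PySem.List.max? (PySem.List.slice stones (some i) (some (i + k))) (fun y => y) with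
        | none => res  -- max of an empty slice raises; unreachable for 1 ≤ k
        | some m => if m < res then m else res) mx
    if res > 0 then res else 0

-- ===== PRECONDITION & SPEC =====
-- Pre_ excludes the empty list, on which A raises ValueError (max([])), and
-- k ≤ 0 — a meaningless window size on which B itself raises ValueError
-- (max of an empty slice) while A happens to treat it like k = 1.
def Pre_solution (stones : List Int) (k : Int) : Prop := stones ≠ [] ∧ 1 ≤ k
instance (stones : List Int) (k : Int) : Decidable (Pre_solution stones k) := by
  unfold Pre_solution; infer_instance
def pvWitness_solution : List Int × Int := ([2, 1, 3], 2)

def Spec_solution (stones : List Int) (k : Int) (out : Int) : Prop := out = solution_alt stones k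
instance (stones : List Int) (k : Int) (out : Int) : Decidable (Spec_solution stones k out) := by unfold Spec_solution; infer_instance

-- ===== CLAIM (what is proved, stated in full; the proofs are below) =====
def Claim_equal_solution : Prop := ∀ (stones : List Int) (k : Int), Dom_solution stones k → Pre_solution stones k → Spec_solution stones k (solution stones k)

-- ===== LEMMAS AND PROOFS =====

-- run-check over the boolean mask (true = stone < mid), Nat counters
def runchk (kn : Nat) : List Bool → Nat → Bool
  | [], _ => true
  | b :: rest, c =>
    if b then
      if c + 1 ≥ kn then false else runchk kn rest (c + 1)
    else runchk kn rest 0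

-- crossLoop is runchk on the mask
theorem crossLoop_eq_runchk (mid k : Int) (hk : 1 ≤ k) :
    ∀ (l : List Int) (cz : Int), 0 ≤ cz →
      crossLoop mid k l cz = runchk k.toNat (l.map (fun s => decide (s < mid))) cz.toNat := by
  intro l
  induction l with
  | nil => intro cz _; rfl
  | cons s rest ih =>
    intro cz hcz
    simp only [crossLoop, List.map, runchk]
    by_cases hs : s < mid
    · simp only [hs, decide_true, if_true]
      by_cases hb : cz + 1 ≥ k
      · have h1 : cz.toNat + 1 ≥ k.toNat := by omega
        simp [hb, h1]
      · have h2 : ¬ (cz.toNat + 1 ≥ k.toNat) := by omega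
        have h3 : (cz + 1).toNat = cz.toNat + 1 := by omega
        simp only [hb, if_false, h2, if_false]
        rw [ih (cz + 1) (by omega), h3]
    · simp only [hs, decide_false, Bool.false_eq_true, if_false]
      have := ih 0 le_rfl
      simpa using this

-- infix of kn trues ↔ drop/take window of trues
theorem infix_replicate_iff (kn : Nat) (L : List Bool) :
    List.replicate kn true <:+: L ↔
      ∃ i, i + kn ≤ L.length ∧ (L.drop i).take kn = List.replicate kn true := by
  constructor
  · rintro ⟨s, t, h⟩
    refine ⟨s.length, ?_, ?_⟩
    · have := congrArg List.length h
      simp at this; omega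
    · have hd : L.drop s.length = List.replicate kn true ++ t := by
        rw [← h, List.append_assoc, List.drop_left]
      rw [hd, List.take_left']
      simp
  · rintro ⟨i, hle, ht⟩
    refine ⟨L.take i, L.drop (i + kn), ?_⟩
    rw [← ht, ← List.drop_drop, List.append_assoc, List.take_append_drop,
       List.take_append_drop]

-- runchk characterization: false ↔ a run of kn consecutive trues (after padding)
theorem runchk_false_iff (kn : Nat) (hkn : 1 ≤ kn) :
    ∀ (m : List Bool) (c : Nat), c < kn →
      (runchk kn m c = false ↔ List.replicate kn true <:+: (List.replicate c true ++ m)) := by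
  intro m
  induction m with
  | nil =>
    intro c hc
    simp only [runchk, List.append_nil]
    constructor
    · intro h; exact absurd h (by simp)
    · intro h
      have := h.length_le
      simp only [List.length_replicate] at this; omega
  | cons b rest ih =>
    intro c hc
    cases b with
    | false =>
      simp only [runchk, Bool.false_eq_true, if_false]
      rw [ih 0 (by omega)]
      simp only [List.replicate_zero, List.nil_append]
      constructor
      · intro h
        refine h.trans ?_
        have := (List.suffix_append (List.replicate c true ++ [false]) rest).isInfix
        simpa using this
      · intro h
        rw [infix_replicate_iff] at h
        rcases h with ⟨i, hle, ht⟩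
        rw [infix_replicate_iff]
        have hlen : (List.replicate c true ++ false :: rest).length = c + 1 + rest.length := by
          simp; omega
        have hci : c < i := by
          by_contra hci
          push_neg at hci
          have hik : c < i + kn := by omega
          have h1 : (((List.replicate c true ++ false :: rest).drop i).take kn)[c - i]? = some true := by
            rw [ht, List.getElem?_replicate]
            simp; omega
          have h2 : (List.replicate c true ++ false :: rest)[c]? = some false := by
            rw [List.getElem?_append_right (by simp)]
            simp
          rw [List.getElem?_take, if_pos (by omega : c - i < kn), List.getElem?_drop] at h1
          have h3 : i + (c - i) = c := by omega
          rw [h3, h2] at h1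
          simp at h1
        refine ⟨i - (c + 1), by simp only [List.length_append, List.length_replicate, List.length_cons] at hle; omega, ?_⟩
        have hdr : (List.replicate c true ++ false :: rest).drop i = rest.drop (i - (c + 1)) := by
          have h1 : List.replicate c true ++ false :: rest
              = (List.replicate c true ++ [false]) ++ rest := by simp
          rw [h1, List.drop_append]
          have h4 : (List.replicate c true ++ [false]).drop i = [] := by
            apply List.drop_eq_nil_of_le; simp; omega
          rw [h4, List.nil_append]
          congr 1
          simp
          try omega
        rw [hdr] at ht
        exact ht
    | true =>
      simp only [runchk, if_true]
      have hrep : List.replicate c true ++ true :: rest = List.replicate (c + 1) true ++ rest := by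
        rw [List.replicate_succ']
        simp
      rw [hrep]
      by_cases hb2 : c + 1 ≥ kn
      · simp only [hb2, if_true]
        constructor
        · intro _
          have hpre : List.replicate kn true <+: List.replicate (c + 1) true := by
            rw [List.prefix_iff_eq_take, List.length_replicate, List.take_replicate]
            congr 1; omega
          exact (hpre.trans (List.prefix_append _ _)).isInfix
        · intro _; trivial
      · push_neg at hb2
        simp only [not_le.mpr hb2, if_false]
        exact ih (c + 1) hb2

-- window (drop i, take kn) of the mask is all-true ↔ all window stones < mid
theorem window_mask (stones : List Int) (mid : Int) (i kn : Nat) (hle : i + kn ≤ stones.length) :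
    (((stones.map (fun s => decide (s < mid))).drop i).take kn = List.replicate kn true) ↔
      (∀ x ∈ (stones.drop i).take kn, x < mid) := by
  rw [← List.map_drop, ← List.map_take]
  rw [List.eq_replicate_iff]
  simp only [List.length_map, List.mem_map]
  constructor
  · rintro ⟨_, h⟩ x hx
    have := h (decide (x < mid)) ⟨x, hx, rfl⟩
    simpa using this
  · intro h
    refine ⟨by rw [List.length_take, List.length_drop]; omega, ?_⟩
    rintro b ⟨x, hx, rfl⟩
    simpa using h x hx

-- max of a nonempty list via foldl: all-below iff fold-max below
theorem foldl_max_lt_iff (h : Int) (t : List Int) (mid : Int) :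
    t.foldl max h < mid ↔ (∀ x ∈ h :: t, x < mid) := by
  constructor
  · intro hlt x hx
    rcases List.mem_cons.mp hx with rfl | hx
    · exact lt_of_le_of_lt (PySem.List.le_foldl_max t x).1 hlt
    · exact lt_of_le_of_lt ((PySem.List.le_foldl_max t h).2 x hx) hlt
  · intro hall
    rcases PySem.List.foldl_max_mem t h with he | he
    · rw [he]; exact hall h (by simp)
    · exact hall _ (by simp [he])

-- B's fold: lower bounds of the running minimum
theorem foldmin_le_iff (g : Int → Int) (l : List Int) :
    ∀ (a x : Int),
      (x ≤ l.foldl (fun r i => if g i < r then g i else r) a ↔ (x ≤ a ∧ ∀ i ∈ l, x ≤ g i)) := by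
  induction l with
  | nil => intro a x; simp
  | cons j t ih =>
    intro a x
    simp only [List.foldl_cons, List.mem_cons]
    rw [ih]
    constructor
    · rintro ⟨h1, h2⟩
      split_ifs at h1 with hj
      · exact ⟨by omega, fun i hi => hi.elim (fun e => e ▸ h1) (h2 i)⟩
      · exact ⟨h1, fun i hi => hi.elim (fun e => by subst e; omega) (h2 i)⟩
    · rintro ⟨h1, h2⟩
      refine ⟨?_, fun i hi => h2 i (Or.inr hi)⟩
      have := h2 j (Or.inl rfl)
      split_ifs <;> omega

-- the window max value used by B, as an Int-indexed function
def wm (stones : List Int) (k i : Int) : Int :=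
  match PySem.List.max? (PySem.List.slice stones (some i) (some (i + k))) (fun y => y) with
  | none => 0
  | some m => m

theorem slice_window (stones : List Int) (k i : Int) (hi : 0 ≤ i) (hk : 1 ≤ k) :
    PySem.List.slice stones (some i) (some (i + k)) = (stones.drop i.toNat).take k.toNat := by
  rw [PySem.List.slice_toNat stones (by omega) (by omega)]
  congr 1; omega

theorem window_ne_nil (stones : List Int) (k i : Int) (hi : 0 ≤ i) (hk : 1 ≤ k)
    (hle : i + k ≤ stones.length) : (stones.drop i.toNat).take k.toNat ≠ [] := by
  have h1 : ((stones.drop i.toNat).take k.toNat).length = k.toNat := by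
    rw [List.length_take, List.length_drop]; omega
  intro hnil; rw [hnil] at h1; simp at h1; omega

theorem wm_spec (stones : List Int) (k i : Int) (hi : 0 ≤ i) (hk : 1 ≤ k)
    (hle : i + k ≤ stones.length) (mid : Int) :
    wm stones k i < mid ↔ ∀ x ∈ (stones.drop i.toNat).take k.toNat, x < mid := by
  unfold wm
  rw [slice_window stones k i hi hk]
  rcases hw : (stones.drop i.toNat).take k.toNat with _ | ⟨h, t⟩
  · exact absurd hw (window_ne_nil stones k i hi hk hle)
  · rw [PySem.List.max?_id_cons]
    exact foldl_max_lt_iff h t mid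

-- feasibility of mid ↔ mid below every window max
theorem crossLoop_true_iff (stones : List Int) (k mid : Int) (hk : 1 ≤ k) :
    crossLoop mid k stones 0 = true ↔
      ∀ i : Int, 0 ≤ i → i + k ≤ stones.length → mid ≤ wm stones k i := by
  rw [crossLoop_eq_runchk mid k hk stones 0 le_rfl]
  simp only [Int.toNat_zero]
  have hkn : 1 ≤ k.toNat := by omega
  have hiff := runchk_false_iff k.toNat hkn (stones.map (fun s => decide (s < mid))) 0 (by omega)
  simp only [List.replicate_zero, List.nil_append] at hiff
  constructor
  · intro htrue i hi hle
    by_contra hlt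
    push_neg at hlt
    rw [wm_spec stones k i hi hk hle mid] at hlt
    have hfalse : runchk k.toNat (stones.map (fun s => decide (s < mid))) 0 = false := by
      rw [hiff, infix_replicate_iff]
      refine ⟨i.toNat, by simp; omega, ?_⟩
      rw [window_mask stones mid i.toNat k.toNat (by omega)]
      exact hlt
    rw [htrue] at hfalse; exact absurd hfalse (by simp)
  · intro hall
    by_contra hfalse
    rw [Bool.not_eq_true] at hfalse
    rw [hiff, infix_replicate_iff] at hfalse
    rcases hfalse with ⟨i, hle, ht⟩
    simp only [List.length_map] at hle
    rw [window_mask stones mid i k.toNat (by omega)] at ht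
    have h2 := hall (i : Int) (by omega) (by omega)
    have h4 : wm stones k (i : Int) < mid := by
      rw [wm_spec stones k (i : Int) (by omega) hk (by omega) mid]
      simpa using ht
    omega

-- binary search lemma, threshold form
theorem bsearch_eq (stones : List Int) (k M : Int)
    (hP : ∀ x, crossLoop x k stones 0 = decide (x ≤ M)) :
    ∀ (N : Nat) (l r res : Int), (r + 1 - l).toNat ≤ N →
      bsearch stones k l r res = if l ≤ r ∧ l ≤ M then min M r else res := by
  intro N
  induction N with
  | zero =>
    intro l r res hN
    rw [bsearch]
    have h0 : ¬ l ≤ r := by omega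
    simp [h0]
  | succ N ih =>
    intro l r res hN
    rw [bsearch]
    by_cases hlr : l ≤ r
    · have hmid := PySem.Int.floordiv_two_mid_bounds hlr
      set mid := PySem.Int.floordiv (l + r) 2 with hm
      simp only [dif_pos hlr, hP]
      by_cases hPm : mid ≤ M
      · rw [if_pos (by simpa using hPm)]
        rw [ih (mid + 1) r mid (by omega)]
        split_ifs with h1 h2 <;> omega
      · rw [if_neg (by simpa using hPm)]
        rw [ih l (mid - 1) res (by omega)]
        split_ifs with h1 h2 <;> omega
    · simp [hlr]

-- binary search lemma, always-feasible form
theorem bsearch_eq_top (stones : List Int) (k : Int)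
    (hP : ∀ x, crossLoop x k stones 0 = true) :
    ∀ (N : Nat) (l r res : Int), (r + 1 - l).toNat ≤ N →
      bsearch stones k l r res = if l ≤ r then r else res := by
  intro N
  induction N with
  | zero =>
    intro l r res hN
    rw [bsearch]
    have h0 : ¬ l ≤ r := by omega
    simp [h0]
  | succ N ih =>
    intro l r res hN
    rw [bsearch]
    by_cases hlr : l ≤ r
    · have hmid := PySem.Int.floordiv_two_mid_bounds hlr
      set mid := PySem.Int.floordiv (l + r) 2 with hm
      simp only [dif_pos hlr, hP, if_true]
      rw [ih (mid + 1) r mid (by omega)]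
      split_ifs with h1 <;> omega
    · simp [hlr]

-- foldl congruence on members (used to replace B's match body by wm)
theorem foldl_ext' {α β : Type} (f g : β → α → β) (a : β) (l : List α)
    (h : ∀ b, ∀ x ∈ l, f b x = g b x) : l.foldl f a = l.foldl g a := by
  induction l generalizing a with
  | nil => rfl
  | cons x t ih =>
    simp only [List.foldl_cons]
    rw [h a x (by simp)]
    exact ih _ (fun b y hy => h b y (by simp [hy]))

-- ===== VERDICT (by name: the statement is the Claim_ definition above) =====
theorem solution_spec : Claim_equal_solution := by
  intro stones k _ hpre
  rcases hpre with ⟨hne, hk⟩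
  show solution stones k = solution_alt stones k
  rcases hm : PySem.List.max? stones (fun y => y) with _ | mx
  · exact absurd ((PySem.List.max?_eq_none_iff _ _).mp hm) hne
  have hmax := PySem.List.max?_isMax hm
  have hArw : solution stones k = bsearch stones k 1 mx 0 := by
    simp only [solution, hm]
  have hBrw : solution_alt stones k =
      (if (PySem.List.pyRange 0 ((stones.length : Int) - k + 1) 1).foldl
          (fun r i => if wm stones k i < r then wm stones k i else r) mx > 0
       then (PySem.List.pyRange 0 ((stones.length : Int) - k + 1) 1).foldl
          (fun r i => if wm stones k i < r then wm stones k i else r) mx else 0) := by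
    simp only [solution_alt, hm, PySem.List.len_eq]
    rw [foldl_ext']
    intro r i hi
    rw [PySem.List.mem_pyRange_one] at hi
    have h0 : (0:Int) ≤ i := hi.1
    have hik : i + k ≤ (stones.length : Int) := by omega
    have hnn : PySem.List.slice stones (some i) (some (i + k)) ≠ [] := by
      rw [slice_window stones k i h0 hk]
      exact window_ne_nil stones k i h0 hk hik
    rcases hs : PySem.List.max? (PySem.List.slice stones (some i) (some (i + k))) (fun y => y)
      with _ | m
    · exact absurd ((PySem.List.max?_eq_none_iff _ _).mp hs) hnn
    · unfold wm; rw [hs]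
  rw [hArw, hBrw]
  set F := (PySem.List.pyRange 0 ((stones.length : Int) - k + 1) 1).foldl
      (fun r i => if wm stones k i < r then wm stones k i else r) mx with hF
  have hchar : ∀ x : Int, x ≤ F ↔
      x ≤ mx ∧ ∀ i ∈ PySem.List.pyRange 0 ((stones.length : Int) - k + 1) 1, x ≤ wm stones k i :=
    fun x => foldmin_le_iff (fun i => wm stones k i) _ mx x
  have hFmx : F ≤ mx := ((hchar F).mp le_rfl).1
  by_cases hkL : k ≤ (stones.length : Int)
  · -- at least one window exists
    have hwm_le : ∀ i : Int, 0 ≤ i → i + k ≤ (stones.length : Int) → wm stones k i ≤ mx := by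
      intro i h0 hik
      have hnn : PySem.List.slice stones (some i) (some (i + k)) ≠ [] := by
        rw [slice_window stones k i h0 hk]
        exact window_ne_nil stones k i h0 hk hik
      unfold wm
      rcases hs : PySem.List.max? (PySem.List.slice stones (some i) (some (i + k))) (fun y => y)
        with _ | m
      · exact absurd ((PySem.List.max?_eq_none_iff _ _).mp hs) hnn
      · exact hmax m (PySem.List.mem_of_mem_slice stones (some i) (some (i + k)) (PySem.List.max?_mem hs))
    have hP : ∀ x : Int, crossLoop x k stones 0 = decide (x ≤ F) := by
      intro x
      have hQ := crossLoop_true_iff stones k x hk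
      by_cases hxF : x ≤ F
      · have htrue : crossLoop x k stones 0 = true := by
          rw [hQ]
          intro i h0 hik
          exact ((hchar x).mp hxF).2 i (by rw [PySem.List.mem_pyRange_one]; omega)
        rw [htrue]
        simp [hxF]
      · have hall_not : ¬ (∀ i : Int, 0 ≤ i → i + k ≤ (stones.length : Int) →
            x ≤ wm stones k i) := by
          intro hall
          apply hxF
          rw [hchar x]
          refine ⟨le_trans (hall 0 le_rfl (by omega)) (hwm_le 0 le_rfl (by omega)), ?_⟩
          intro i hi
          rw [PySem.List.mem_pyRange_one] at hi
          exact hall i hi.1 (by omega)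
        have hfalse : crossLoop x k stones 0 = false := by
          rcases Bool.eq_false_or_eq_true (crossLoop x k stones 0) with h | h
          · exact absurd (hQ.mp h) hall_not
          · exact h
        rw [hfalse]
        simp [hxF]
    rw [bsearch_eq stones k F hP (mx + 1 - 1).toNat 1 mx 0 (by omega)]
    split_ifs <;> omega
  · -- fewer than k stones: the range is empty and every value crosses
    have hFeq : F = mx := by
      rw [hF, PySem.List.pyRange_one_eq_nil (by omega)]
      rfl
    have hP : ∀ x : Int, crossLoop x k stones 0 = true := by
      intro x
      rw [crossLoop_true_iff stones k x hk]
      intro i h0 hik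
      exact absurd hik (by omega)
    rw [bsearch_eq_top stones k hP (mx + 1 - 1).toNat 1 mx 0 (by omega)]
    split_ifs <;> omega
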